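-- pv_equiv track=rewrite | github.com/hoanglongvonguyen009/resume-ner-azureml | .cursor/rules/module-readmes-two-tier/scripts/update_generated_block.py | _find_marker_indices
-- ===== SOURCE A (Python) =====
-- from typing import Iterable, Tuple
--
-- START_MARKER = "<!-- AUTO-GENERATED:START -->"
--
-- END_MARKER = "<!-- AUTO-GENERATED:END -->"
--
-- def _find_marker_indices(lines: Iterable[str]) -> Tuple[int | None, int | None, int, int]:
--     """
--     Find indices of START and END markers and count occurrences.
--
--     Returns (start_index, end_index, start_count, end_count).
--     """
--
--     start_index: int | None = None
--     end_index: int | None = None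
--     start_count = 0
--     end_count = 0
--
--     for idx, line in enumerate(lines):
--         stripped = line.strip()
--         if stripped == START_MARKER:
--             start_count += 1
--             if start_index is None:
--                 start_index = idx
--         if stripped == END_MARKER:
--             end_count += 1
--             if end_index is None:
--                 end_index = idx
--
--     return start_index, end_index, start_count, end_count
-- ===== SOURCE B (Python) =====
-- from typing import Iterable, Tuple
--
-- START_MARKER = "<!-- AUTO-GENERATED:START -->"
-- END_MARKER = "<!-- AUTO-GENERATED:END -->"
--
-- def _find_marker_indices(lines: Iterable[str]) -> Tuple[int | None, int | None, int, int]: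
--     stripped = [line.strip() for line in lines]
--     start_index = stripped.index(START_MARKER) if START_MARKER in stripped else None
--     end_index = stripped.index(END_MARKER) if END_MARKER in stripped else None
--     return start_index, end_index, stripped.count(START_MARKER), stripped.count(END_MARKER)
-- ===== Notes on version B (the rewrite author's own statement) =====
-- stated objective: simpler
-- what changed: Replaces the single enumerate loop carrying a four-field accumulator with one up-front strip pass followed by independent built-in index/count scans over the stripped list.
import Mathlib
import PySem

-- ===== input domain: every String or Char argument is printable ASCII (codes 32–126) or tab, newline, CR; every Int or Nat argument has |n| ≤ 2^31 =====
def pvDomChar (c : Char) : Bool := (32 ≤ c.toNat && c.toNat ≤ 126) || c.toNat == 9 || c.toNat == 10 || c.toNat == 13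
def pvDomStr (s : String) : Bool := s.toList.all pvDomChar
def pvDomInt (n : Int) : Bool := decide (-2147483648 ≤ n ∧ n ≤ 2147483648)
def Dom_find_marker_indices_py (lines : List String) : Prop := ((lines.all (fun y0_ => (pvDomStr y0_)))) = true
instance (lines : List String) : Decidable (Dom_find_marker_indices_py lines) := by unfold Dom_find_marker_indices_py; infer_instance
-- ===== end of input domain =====

-- B replaces A's single accumulator loop by a strip pass plus independent index/count scans (simpler decomposition, same cost).


def pvStartMarker : String := "<!-- AUTO-GENERATED:START -->"
def pvEndMarker : String := "<!-- AUTO-GENERATED:END -->"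

-- ===== PORT A =====
-- the for-loop over enumerate(lines) with its four-field accumulator, idx carried explicitly
def findMarkerLoop : List String → Nat → (Option Int × Option Int × Int × Int) → (Option Int × Option Int × Int × Int)
  | [], _, st => st
  | line :: rest, idx, (si, ei, sc, ec) =>
      let stripped := PySem.Str.strip line
      let sc' := if stripped == pvStartMarker then sc + 1 else sc
      let si' := if stripped == pvStartMarker then (if si = none then some (idx : Int) else si) else si
      let ec' := if stripped == pvEndMarker then ec + 1 else ec
      let ei' := if stripped == pvEndMarker then (if ei = none then some (idx : Int) else ei) else ei
      findMarkerLoop rest (idx + 1) (si', ei', sc', ec')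

def find_marker_indices_py (lines : List String) : Option Int × Option Int × Int × Int :=
  findMarkerLoop lines 0 (none, none, 0, 0)

-- ===== PORT B =====
def find_marker_indices_py_alt (lines : List String) : Option Int × Option Int × Int × Int :=
  let stripped := lines.map PySem.Str.strip
  let start_index := (PySem.List.index? stripped pvStartMarker).map (fun n => (n : Int))
  let end_index := (PySem.List.index? stripped pvEndMarker).map (fun n => (n : Int))
  (start_index, end_index, (PySem.List.count stripped pvStartMarker : Int), (PySem.List.count stripped pvEndMarker : Int))

-- ===== PRECONDITION & SPEC =====
def Spec_find_marker_indices_py (lines : List String) (out : Option Int × Option Int × Int × Int) : Prop := out = find_marker_indices_py_alt lines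
instance (lines : List String) (out : Option Int × Option Int × Int × Int) : Decidable (Spec_find_marker_indices_py lines out) := by unfold Spec_find_marker_indices_py; infer_instance

-- ===== CLAIM (what is proved, stated in full; the proofs are below) =====
def Claim_equal_find_marker_indices_py : Prop := ∀ (lines : List String), Dom_find_marker_indices_py lines → Spec_find_marker_indices_py lines (find_marker_indices_py lines)

-- ===== LEMMAS AND PROOFS =====

set_option maxHeartbeats 1000000 in
lemma findMarkerLoop_spec (lines : List String) (idx : Nat) (si ei : Option Int) (sc ec : Int) :
    findMarkerLoop lines idx (si, ei, sc, ec) =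
      ((match si with
        | some v => some v
        | none => (PySem.List.index? (lines.map PySem.Str.strip) pvStartMarker).map (fun n => ((idx + n : Nat) : Int))),
       (match ei with
        | some v => some v
        | none => (PySem.List.index? (lines.map PySem.Str.strip) pvEndMarker).map (fun n => ((idx + n : Nat) : Int))),
       sc + ((lines.map PySem.Str.strip).count pvStartMarker : Int),
       ec + ((lines.map PySem.Str.strip).count pvEndMarker : Int)) := by
  have hne : pvStartMarker ≠ pvEndMarker := by decide
  induction lines generalizing idx si ei sc ec with
  | nil =>
    simp [findMarkerLoop, PySem.List.index?]
    cases si <;> cases ei <;> simp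
  | cons l rest ih =>
    simp only [findMarkerLoop]
    rw [ih]
    by_cases hs : PySem.Str.strip l = pvStartMarker <;>
      by_cases he : PySem.Str.strip l = pvEndMarker <;>
        cases si <;> cases ei <;>
          simp [hs, he, hne, hne.symm, List.count_cons, List.idxOf?_cons, Option.map_map] <;>
          first
            | exact absurd (hs.symm.trans he) hne
            | (refine ⟨?_, ?_⟩ <;>
                first
                  | exact trivial
                  | ring1
                  | (refine congrArg₂ Option.map ?_ rfl; funext n; simp only [Function.comp_apply]; push_cast; ring))
            | ring1
            | (refine congrArg₂ Option.map ?_ rfl; funext n; simp only [Function.comp_apply]; push_cast; ring)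

-- ===== VERDICT (by name: the statement is the Claim_ definition above) =====
theorem find_marker_indices_py_spec : Claim_equal_find_marker_indices_py := by
  intro lines _
  unfold Spec_find_marker_indices_py find_marker_indices_py find_marker_indices_py_alt
  rw [findMarkerLoop_spec]
  simp [PySem.List.count, PySem.List.index?_eq_idxOf?, Option.map_eq_bind]
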